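-- pv_equiv track=rewrite | github.com/RogelioKG/Duel-Master | backend/src/card/translation_pipeline.py | normalize_punctuation
-- ===== SOURCE A (Python) =====
-- def normalize_punctuation(text: str) -> str:
--     """中文標點符號標準化
--
--     Parameters
--     ----------
--     text : str
--         標準化前字串
--
--     Returns
--     -------
--     str
--         標準化後字串
--     """
--     norm_map = {
--         ":": "：",
--         ";": "；",
--         "!": "！",
--         "?": "？",
--         ",": "，",
--         ".": "。",
--     }
--     return "".join(norm_map.get(char, char) for char in text)
-- ===== SOURCE B (Python) =====
-- def normalize_punctuation(text: str) -> str: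
--     return (text.replace(":", "：")
--                 .replace(";", "；")
--                 .replace("!", "！")
--                 .replace("?", "？")
--                 .replace(",", "，")
--                 .replace(".", "。"))
-- ===== Notes on version B (the rewrite author's own statement) =====
-- stated objective: idiomatic
-- what changed: Replaces the per-character dict-lookup generator joined into a string with six chained str.replace passes, one full-string scan per punctuation pair; order cannot interfere because the fullwidth outputs never match later ASCII patterns.
import Mathlib
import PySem

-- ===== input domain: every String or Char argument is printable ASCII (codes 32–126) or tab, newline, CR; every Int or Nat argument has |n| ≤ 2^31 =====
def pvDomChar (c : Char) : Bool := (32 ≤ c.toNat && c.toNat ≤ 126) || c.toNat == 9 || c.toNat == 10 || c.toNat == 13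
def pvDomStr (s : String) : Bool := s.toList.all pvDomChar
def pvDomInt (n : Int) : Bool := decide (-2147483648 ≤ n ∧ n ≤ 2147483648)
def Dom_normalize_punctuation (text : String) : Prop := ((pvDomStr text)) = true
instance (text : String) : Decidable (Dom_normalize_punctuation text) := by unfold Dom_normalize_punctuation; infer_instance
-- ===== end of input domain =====

-- B replaces A's per-character dict-lookup join by six chained str.replace passes
-- (one full-string scan per punctuation pair); same result, more idiomatic.


-- ===== PORT A =====
-- the literal dict norm_map
def pvNormMap : PySem.Dict String String :=
  PySem.Dict.ofList [(":", "："), (";", "；"), ("!", "！"), ("?", "？"), (",", "，"), (".", "。")]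

-- "".join(norm_map.get(char, char) for char in text)  — iterating a str yields 1-char strings
def normalize_punctuation (text : String) : String :=
  PySem.Str.join "" (text.toList.map (fun c => pvNormMap.getD (String.ofList [c]) (String.ofList [c])))

-- ===== PORT B =====
-- str.replace ported by hand for exactly the case B uses: the pattern and the replacement
-- are both single characters — there str.replace is this left-to-right scan (exact).
def pvReplace1 (old new : Char) : List Char → List Char
  | [] => []
  | c :: rest => (if c = old then new else c) :: pvReplace1 old new rest

def normalize_punctuation_alt (text : String) : String :=
  String.ofList (pvReplace1 '.' '。' (pvReplace1 ',' '，' (pvReplace1 '?' '？'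
    (pvReplace1 '!' '！' (pvReplace1 ';' '；' (pvReplace1 ':' '：' text.toList))))))

-- ===== PRECONDITION & SPEC =====
def Spec_normalize_punctuation (text : String) (out : String) : Prop := out = normalize_punctuation_alt text
instance (text : String) (out : String) : Decidable (Spec_normalize_punctuation text out) := by unfold Spec_normalize_punctuation; infer_instance

-- ===== CLAIM (what is proved, stated in full; the proofs are below) =====
def Claim_equal_normalize_punctuation : Prop := ∀ (text : String), Dom_normalize_punctuation text → Spec_normalize_punctuation text (normalize_punctuation text)

-- ===== LEMMAS AND PROOFS =====

-- the one-pass character map both programs compute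
def pvG (c : Char) : Char :=
  if c = ':' then '：' else if c = ';' then '；' else if c = '!' then '！'
  else if c = '?' then '？' else if c = ',' then '，' else if c = '.' then '。' else c

-- one replacement step, per character
def pvStep (old new c : Char) : Char := if c = old then new else c

theorem pvComp_eq_G (c : Char) :
    pvStep '.' '。' (pvStep ',' '，' (pvStep '?' '？' (pvStep '!' '！'
      (pvStep ';' '；' (pvStep ':' '：' c))))) = pvG c := by
  by_cases h1 : c = ':'
  · subst h1; decide
  by_cases h2 : c = ';'
  · subst h2; decide
  by_cases h3 : c = '!'
  · subst h3; decide
  by_cases h4 : c = '?'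
  · subst h4; decide
  by_cases h5 : c = ','
  · subst h5; decide
  by_cases h6 : c = '.'
  · subst h6; decide
  simp [pvStep, pvG, h1, h2, h3, h4, h5, h6]

theorem getD_eq_G (c : Char) :
    pvNormMap.getD (String.ofList [c]) (String.ofList [c]) = String.ofList [pvG c] := by
  by_cases h1 : c = ':'
  · subst h1; decide
  by_cases h2 : c = ';'
  · subst h2; decide
  by_cases h3 : c = '!'
  · subst h3; decide
  by_cases h4 : c = '?'
  · subst h4; decide
  by_cases h5 : c = ','
  · subst h5; decide
  by_cases h6 : c = '.'
  · subst h6; decide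
  have key : ∀ (s : String) (k : Char), s.toList = [k] → c ≠ k → (s == String.ofList [c]) = false := by
    intro s k hs hk
    rw [beq_eq_false_iff_ne]
    intro he
    have hkc : k = c := by
      have h2 := congrArg String.toList he
      rw [hs] at h2
      simpa using h2
    exact hk hkc.symm
  have hm : pvNormMap = ⟨[(":", "："), (";", "；"), ("!", "！"), ("?", "？"), (",", "，"), (".", "。")]⟩ := by decide
  rw [PySem.Dict.getD_eq_get?_getD, hm]
  simp [PySem.Dict.get?,
        key ":" ':' (by decide) h1, key ";" ';' (by decide) h2, key "!" '!' (by decide) h3,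
        key "?" '?' (by decide) h4, key "," ',' (by decide) h5, key "." '.' (by decide) h6,
        pvG, h1, h2, h3, h4, h5, h6]

theorem a_toList (text : String) :
    (normalize_punctuation text).toList = text.toList.map pvG := by
  unfold normalize_punctuation
  rw [PySem.Str.toList_join]
  have h1 : (text.toList.map (fun c => pvNormMap.getD (String.ofList [c]) (String.ofList [c]))).map
      String.toList = text.toList.map (fun c => [pvG c]) := by
    simp only [List.map_map]
    apply List.map_congr_left
    intro c _
    simp [Function.comp, getD_eq_G c]
  have h2 : text.toList.map (fun c => [pvG c]) = (text.toList.map pvG).map (fun c => [c]) := by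
    rw [List.map_map]
    rfl
  rw [h1, h2]
  exact PySem.Chars.join_nil_singletons (text.toList.map pvG)

theorem b_chain (l : List Char) :
    pvReplace1 '.' '。' (pvReplace1 ',' '，' (pvReplace1 '?' '？' (pvReplace1 '!' '！'
      (pvReplace1 ';' '；' (pvReplace1 ':' '：' l))))) = l.map pvG := by
  induction l with
  | nil => rfl
  | cons c rest ih =>
    simp only [pvReplace1]
    rw [List.map_cons, ih]
    have hc := pvComp_eq_G c
    simp only [pvStep] at hc
    rw [hc]

theorem b_eq (text : String) :
    normalize_punctuation_alt text = String.ofList (text.toList.map pvG) := by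
  unfold normalize_punctuation_alt
  rw [b_chain]

-- ===== VERDICT (by name: the statement is the Claim_ definition above) =====
theorem normalize_punctuation_spec : Claim_equal_normalize_punctuation := by
  intro text _
  unfold Spec_normalize_punctuation
  rw [b_eq, ← a_toList]
  exact String.ofList_toList.symm
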